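-- pv_equiv track=rewrite | github.com/Dhyanvj/Programming-Exercise | progex-2-1 (1).py | LargestMagnitudeOdd
-- ===== SOURCE A (Python) =====
-- def LargestMagnitudeOdd (numberList) :
--     numList = []
--     for i in numberList :
--         if i % 2 != 0 :
--             numList.append(i)
--     if len(numList) == 0 :
--         return 100
--     else :
--         return max(numList, key=abs)
--
--     # Returns the odd number in numberList that has the largest magnitude
--     # (the one that is furthest from zero, whether in a positive or a negative
--     # direction).
--     # If numberList contains no odd numbers the function should return
--     # the value 100.
--
--     return 100
-- ===== SOURCE B (Python) =====
-- def LargestMagnitudeOdd(numberList):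
--     # Single fused pass keeping the current best odd number; no intermediate list.
--     best = None
--     for i in numberList:
--         if i % 2 != 0 and (best is None or abs(i) > abs(best)):
--             best = i
--     return 100 if best is None else best
-- ===== Notes on version B (the rewrite author's own statement) =====
-- stated objective: simpler
-- what changed: Replaces the filter-into-a-list pass followed by max(key=abs) with one fused pass that maintains the best odd element seen so far (strict > keeps the first of a magnitude tie), never building the intermediate list.
import Mathlib
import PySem

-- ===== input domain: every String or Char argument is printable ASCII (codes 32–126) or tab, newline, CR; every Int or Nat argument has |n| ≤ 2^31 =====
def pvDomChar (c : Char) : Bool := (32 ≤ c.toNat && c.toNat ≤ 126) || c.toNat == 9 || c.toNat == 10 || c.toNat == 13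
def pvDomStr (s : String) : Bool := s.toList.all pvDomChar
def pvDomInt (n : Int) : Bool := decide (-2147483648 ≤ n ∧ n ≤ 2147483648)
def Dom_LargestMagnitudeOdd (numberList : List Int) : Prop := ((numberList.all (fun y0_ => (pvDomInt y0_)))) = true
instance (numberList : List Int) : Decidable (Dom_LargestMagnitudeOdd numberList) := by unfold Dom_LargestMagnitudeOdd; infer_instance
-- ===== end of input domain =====

-- B replaces the filter-then-max(key=abs) with one fused best-so-far pass (no intermediate list); return values proved equal.

-- ===== PORT A =====
-- builds numList by appending the odd elements, then max(numList, key=abs) (first maximal element);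
-- the 'none => 100' arm is unreachable because it is guarded by the emptiness test, as in the Python.
def LargestMagnitudeOdd (numberList : List Int) : Int :=
  let numList := numberList.foldl (fun acc i => if PySem.Int.mod i 2 ≠ 0 then acc ++ [i] else acc) ([] : List Int)
  if numList.length = 0 then 100
  else
    match PySem.List.max? numList (fun x => |x|) with
    | some m => m
    | none => 100

-- ===== PORT B =====
def LargestMagnitudeOdd_alt (numberList : List Int) : Int :=
  let best := numberList.foldl
    (fun best i =>
      if PySem.Int.mod i 2 ≠ 0 ∧ (best = none ∨ |(best.getD 0)| < |i|) then some i else best)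
    (none : Option Int)
  match best with
  | none => 100
  | some b => b

-- ===== PRECONDITION & SPEC =====
def Spec_LargestMagnitudeOdd (numberList : List Int) (out : Int) : Prop := out = LargestMagnitudeOdd_alt numberList
instance (numberList : List Int) (out : Int) : Decidable (Spec_LargestMagnitudeOdd numberList out) := by unfold Spec_LargestMagnitudeOdd; infer_instance

-- ===== CLAIM (what is proved, stated in full; the proofs are below) =====
def Claim_equal_LargestMagnitudeOdd : Prop := ∀ (numberList : List Int), Dom_LargestMagnitudeOdd numberList → Spec_LargestMagnitudeOdd numberList (LargestMagnitudeOdd numberList)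

-- ===== LEMMAS AND PROOFS =====

-- Python's i % 2 != 0 (fmod) as an emod condition, for Int divisor 2.
theorem oddCond (i : Int) : (PySem.Int.mod i 2 ≠ 0) = (i % 2 = 1) := by
  unfold PySem.Int.mod
  rw [Int.fmod_eq_emod]
  simp

-- A's appending loop builds exactly the filtered list.
theorem foldl_append_filter_odd (xs : List Int) (l : List Int) :
    xs.foldl (fun acc i => if i % 2 = 1 then acc ++ [i] else acc) l
      = l ++ xs.filter (fun i => decide (i % 2 = 1)) := by
  induction xs generalizing l with
  | nil => simp
  | cons x t ih =>
    by_cases h : x % 2 = 1 <;> simp [List.foldl_cons, h, ih]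

-- B's fused loop equals max?'s running fold over the filtered list.
theorem fused_eq_max_fold (xs : List Int) (acc : Option Int) :
    xs.foldl
      (fun best i =>
        if i % 2 = 1 ∧ (best = none ∨ |(best.getD 0)| < |i|) then some i else best)
      acc
    = (xs.filter (fun i => decide (i % 2 = 1))).foldl
        (fun a x =>
          match a with
          | none => some x
          | some m => if |m| < |x| then some x else some m)
        acc := by
  induction xs generalizing acc with
  | nil => rfl
  | cons x t ih =>
    by_cases h : x % 2 = 1
    · cases acc with
      | none => simp [h, ih]
      | some b =>
        by_cases hlt : |b| < |x| <;> simp [h, hlt, ih]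
    · simp [h, ih]

-- B's fold from none is exactly max?(filtered list, key=abs).
theorem fused_eq_max (xs : List Int) :
    xs.foldl
      (fun best i =>
        if i % 2 = 1 ∧ (best = none ∨ |(best.getD 0)| < |i|) then some i else best)
      none
    = PySem.List.max? (xs.filter (fun i => decide (i % 2 = 1))) (fun x => |x|) := by
  rw [fused_eq_max_fold]
  unfold PySem.List.max?
  congr 1
  funext a x
  cases a <;> rfl

-- ===== VERDICT (by name: the statement is the Claim_ definition above) =====
theorem LargestMagnitudeOdd_spec : Claim_equal_LargestMagnitudeOdd := by
  intro xs _
  unfold Spec_LargestMagnitudeOdd LargestMagnitudeOdd LargestMagnitudeOdd_alt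
  simp only [oddCond]
  rw [foldl_append_filter_odd, fused_eq_max, List.nil_append]
  cases hfl : xs.filter (fun i => decide (i % 2 = 1)) with
  | nil => rfl
  | cons y t =>
    rw [if_neg (by simp)]
    rcases hm : PySem.List.max? (y :: t) (fun x => |x|) with _ | m <;> rfl
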